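-- pv_equiv track=rewrite | github.com/DivyanshuDX/tathastu_week_of_code | Day5/program3.py | home
-- ===== SOURCE A (Python) =====
-- def home(List):
--     if len(List) == 1:
--         return List[0]
--     if len(List) == 2:
--         return max(List)
--     if len(List) == 3:
--         return max(List[1], List[0] + home(List[2:]))
--     return max(List[1] + home(List[3:]), List[0] + home(List[2:]))
-- ===== SOURCE B (Python) =====
-- def home(List):
--     # One backward pass over the list (O(n) DP over suffixes) instead of
--     # A's branching recursion; rolling values f1,f2,f3 are the results for
--     # the suffixes starting one, two and three positions further right.
--     f1 = f2 = f3 = 0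
--     prev = 0
--     m = 0
--     for x in reversed(List):
--         m += 1
--         if m == 1:
--             v = x
--         elif m == 2:
--             v = max(x, prev)
--         elif m == 3:
--             v = max(prev, x + f2)
--         else:
--             v = max(prev + f3, x + f2)
--         f1, f2, f3 = v, f1, f2
--         prev = x
--     return f1
-- ===== Notes on version B (the rewrite author's own statement) =====
-- stated objective: faster
-- what changed: Replaces A's exponential two-branch recursion over list suffixes by a single backward pass keeping the three most recent suffix values (rolling DP).
import Mathlib
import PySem

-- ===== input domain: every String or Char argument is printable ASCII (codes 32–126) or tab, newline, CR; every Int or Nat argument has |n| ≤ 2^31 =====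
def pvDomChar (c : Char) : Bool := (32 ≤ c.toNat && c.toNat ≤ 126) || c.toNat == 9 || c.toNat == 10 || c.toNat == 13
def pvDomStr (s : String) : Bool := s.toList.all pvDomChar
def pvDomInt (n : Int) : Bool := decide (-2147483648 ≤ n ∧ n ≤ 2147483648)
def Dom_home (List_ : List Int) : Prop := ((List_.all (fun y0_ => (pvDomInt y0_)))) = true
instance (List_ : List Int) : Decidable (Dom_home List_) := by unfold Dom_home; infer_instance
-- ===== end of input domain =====

-- B replaces A's exponential two-branch recursion over suffixes by one O(n) backward pass
-- keeping three rolling suffix values (asymptotic speed-up); return values agree on all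
-- nonempty lists.

-- ===== PORT A =====
-- literal transliteration of A's recursion (List[k] as headD of drop, List[k:] as drop)
def home (List_ : List Int) : Int :=
  if List_.length = 1 then List_.headD 0
  else if List_.length = 2 then max (List_.headD 0) ((List_.drop 1).headD 0)
  else if List_.length = 3 then
    max ((List_.drop 1).headD 0) (List_.headD 0 + home (List_.drop 2))
  else if 4 ≤ List_.length then
    max ((List_.drop 1).headD 0 + home (List_.drop 3))
        (List_.headD 0 + home (List_.drop 2))
  else 0  -- empty list: Python raises IndexError (outside Pre_home)
termination_by List_.length
decreasing_by all_goals simp [List.length_drop]; omega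

-- ===== PORT B =====
-- state = (f1, f2, f3, m, prev): f1/f2/f3 are B's rolling suffix values, m the count, prev the last element seen
def homeStep (st : Int × Int × Int × Int × Int) (x : Int) : Int × Int × Int × Int × Int :=
  let f1 := st.1
  let f2 := st.2.1
  let f3 := st.2.2.1
  let m := st.2.2.2.1 + 1
  let prev := st.2.2.2.2
  let v := if m = 1 then x
           else if m = 2 then max x prev
           else if m = 3 then max prev (x + f2)
           else max (prev + f3) (x + f2)
  (v, f1, f2, m, x)

def home_alt (List_ : List Int) : Int :=
  (List_.reverse.foldl homeStep (0, 0, 0, 0, 0)).1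

-- ===== PRECONDITION & SPEC =====
-- Pre_home excludes exactly the empty list, on which A raises IndexError.
def Pre_home (List_ : List Int) : Prop := List_ ≠ []
instance (List_ : List Int) : Decidable (Pre_home List_) := by unfold Pre_home; infer_instance
def pvWitness_home : List Int := [1, 5, 2, 4, 3]
def Spec_home (List_ : List Int) (out : Int) : Prop := out = home_alt List_
instance (List_ : List Int) (out : Int) : Decidable (Spec_home List_ out) := by unfold Spec_home; infer_instance

-- ===== CLAIM (what is proved, stated in full; the proofs are below) =====
def Claim_equal_home : Prop := ∀ (List_ : List Int), Dom_home List_ → Pre_home List_ → Spec_home List_ (home List_)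

-- ===== LEMMAS AND PROOFS =====

-- A's value on a suffix, extended by 0 to the empty list
def homeG (l : List Int) : Int := if l = [] then 0 else home l

theorem homeG_nil : homeG [] = 0 := by simp [homeG]

theorem homeG_one (x : Int) : homeG [x] = x := by
  simp [homeG]; rw [home.eq_def]; simp

theorem homeG_two (x a : Int) : homeG [x, a] = max x a := by
  simp [homeG]; rw [home.eq_def]; simp

theorem homeG_three (x a b : Int) : homeG [x, a, b] = max a (x + b) := by
  simp [homeG]; rw [home.eq_def]; simp
  rw [home.eq_def]; simp

theorem homeG_big (x a b c : Int) (u : List Int) :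
    homeG (x :: a :: b :: c :: u)
      = max (a + homeG (c :: u)) (x + homeG (b :: c :: u)) := by
  simp [homeG]; rw [home.eq_def]
  simp

theorem homeStep_foldr (l : List Int) :
    l.foldr (fun x st => homeStep st x) (0, 0, 0, 0, 0)
      = (homeG l, homeG (l.drop 1), homeG (l.drop 2), (l.length : Int), l.headD 0) := by
  induction l with
  | nil => simp [homeG]
  | cons x t ih =>
    simp only [List.foldr_cons, ih]
    match t with
    | [] => simp [homeStep, homeG_nil, homeG_one]
    | [a] => simp [homeStep, homeG_nil, homeG_one, homeG_two]
    | [a, b] =>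
      simp [homeStep, homeG_one, homeG_two, homeG_three]
    | a :: b :: c :: u =>
      rw [homeG_big]
      simp only [homeStep]
      split_ifs with p q r <;> first | rfl | (exfalso; simp only [List.length_cons] at *; omega)

-- ===== VERDICT (by name: the statement is the Claim_ definition above) =====
theorem home_spec : Claim_equal_home := by
  intro List_ _ hpre
  unfold Spec_home home_alt
  rw [List.foldl_reverse]
  have := homeStep_foldr List_
  rw [this]
  simp only [homeG]
  rw [if_neg hpre]
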